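-- pv_equiv track=rewrite | github.com/jokfun/algogentp | courbe.py | plusloin
-- ===== SOURCE A (Python) =====
-- def plusloin(mdp,alphabet):
--     """
--         Fonction du plus proche caractère, suivant l'aphabet utilisé
--         ex : A et D sont plus éloignés que A et C
--     """
--     loin = int(len(alphabet)/2)
--     result = [mdp]
--     for i in range(len(mdp)):
--         pos = alphabet.index(mdp[i])
--         if pos+loin >= len(alphabet):
--             pos=pos+loin-len(alphabet)
--         else:
--             pos+=loin
--         mdp = list(mdp)
--         mdp[i] = alphabet[pos]
--         mdp = ''.join(mdp)
--         result.insert(0,mdp)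
--     return result
-- ===== SOURCE B (Python) =====
-- def plusloin(mdp, alphabet):
--     loin = len(alphabet) // 2
--     final = ''.join(alphabet[(alphabet.index(c) + loin) % len(alphabet)] for c in mdp)
--     return [final[:k] + mdp[k:] for k in range(len(mdp), -1, -1)]
-- ===== Notes on version B (the rewrite author's own statement) =====
-- stated objective: simpler
-- what changed: B computes the fully shifted string once in a single pass and then builds every intermediate password by slicing (final[:k] + mdp[k:]), replacing A's per-step list-mutation/join and insert(0) accumulation.
import Mathlib
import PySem

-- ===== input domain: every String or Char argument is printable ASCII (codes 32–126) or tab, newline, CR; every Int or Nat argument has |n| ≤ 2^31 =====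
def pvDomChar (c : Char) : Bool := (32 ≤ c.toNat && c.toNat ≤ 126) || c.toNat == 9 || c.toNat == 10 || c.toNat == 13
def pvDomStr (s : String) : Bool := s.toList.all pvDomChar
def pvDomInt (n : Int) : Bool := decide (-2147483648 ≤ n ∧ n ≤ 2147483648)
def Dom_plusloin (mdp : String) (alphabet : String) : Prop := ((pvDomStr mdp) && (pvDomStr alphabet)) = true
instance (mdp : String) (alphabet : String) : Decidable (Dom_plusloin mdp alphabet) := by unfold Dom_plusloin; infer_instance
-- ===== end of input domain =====

-- B computes the fully shifted string in one pass, then builds each intermediate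
-- password by slicing — a different decomposition (simpler), not faster.


-- ===== PORT A =====
-- the Python for-loop over range(len(mdp)) with in-place mutation of mdp;
-- `none` where Python raises ValueError (char not in alphabet)
def pvA_loop (al : List Char) (loin : Nat) (n : Nat) (i : Nat)
    (cur : List Char) (result : List String) : Option (List String) :=
  if _h : i < n then
    match cur[i]? with
    | none => none
    | some c =>
      match PySem.List.index? al c with
      | none => none                        -- Python: ValueError from alphabet.index
      | some idx =>
        let pos := if idx + loin ≥ al.length then idx + loin - al.length else idx + loin
        match al[pos]? with
        | none => none
        | some d =>
          pvA_loop al loin n (i + 1) (cur.set i d) (String.ofList (cur.set i d) :: result)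
  else some result
  termination_by n - i

def plusloin (mdp : String) (alphabet : String) : List String :=
  (pvA_loop alphabet.toList (alphabet.toList.length / 2)
    mdp.toList.length 0 mdp.toList [mdp]).getD []

-- ===== PORT B =====
-- one shift of a single character; none where Python raises ValueError
def pvShift (al : List Char) (loin : Nat) (c : Char) : Option Char := do
  let idx ← PySem.List.index? al c
  al[(idx + loin) % al.length]?

def plusloin_alt (mdp : String) (alphabet : String) : List String :=
  match mdp.toList.mapM (pvShift alphabet.toList (alphabet.toList.length / 2)) with
  | none => []
  | some fin =>
    (List.range (mdp.toList.length + 1)).reverse.map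
      (fun k => String.ofList (fin.take k ++ mdp.toList.drop k))

-- ===== PRECONDITION & SPEC =====
-- Pre_ excludes exactly the inputs where some character of mdp is not in alphabet:
-- there Python A (and Python B alike) raises ValueError.
def Pre_plusloin (mdp : String) (alphabet : String) : Prop :=
  (mdp.toList.all (fun c => alphabet.toList.contains c)) = true
instance (mdp : String) (alphabet : String) : Decidable (Pre_plusloin mdp alphabet) := by
  unfold Pre_plusloin; infer_instance

def pvWitness_plusloin : String × String := ("a", "ab")

def Spec_plusloin (mdp : String) (alphabet : String) (out : List String) : Prop := out = plusloin_alt mdp alphabet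
instance (mdp : String) (alphabet : String) (out : List String) : Decidable (Spec_plusloin mdp alphabet out) := by unfold Spec_plusloin; infer_instance

-- ===== CLAIM (what is proved, stated in full; the proofs are below) =====
def Claim_equal_plusloin : Prop := ∀ (mdp : String) (alphabet : String), Dom_plusloin mdp alphabet → Pre_plusloin mdp alphabet → Spec_plusloin mdp alphabet (plusloin mdp alphabet)

-- ===== LEMMAS AND PROOFS =====

-- total shift function agreeing with pvShift on characters of the alphabet
def pvShiftT (al : List Char) (loin : Nat) (c : Char) : Char :=
  match PySem.List.index? al c with
  | some idx => al.getD ((idx + loin) % al.length) c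
  | none => c

theorem pvShift_mem {al : List Char} {loin : Nat} {c : Char} (hc : c ∈ al) :
    pvShift al loin c = some (pvShiftT al loin c) := by
  obtain ⟨idx, hidx⟩ := Option.isSome_iff_exists.mp
    ((PySem.List.index?_isSome_iff al c).mpr hc)
  rw [PySem.List.index?_eq_idxOf?] at hidx
  have hlen : 0 < al.length := List.length_pos_of_mem hc
  have hlt : (idx + loin) % al.length < al.length := Nat.mod_lt _ hlen
  simp [pvShift, pvShiftT, hidx, List.getElem?_eq_getElem hlt]

theorem pvMapM_shift {al : List Char} {loin : Nat} {l : List Char}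
    (h : ∀ c ∈ l, c ∈ al) :
    l.mapM (pvShift al loin) = some (l.map (pvShiftT al loin)) := by
  induction l with
  | nil => rfl
  | cons x xs ih =>
    rw [List.mapM_cons, pvShift_mem (h x List.mem_cons_self),
      ih (fun c hc => h c (List.mem_cons_of_mem _ hc))]
    rfl

-- A's conditional subtraction computes the single modulo
theorem pvPos_eq {len idx loin : Nat} (hi : idx < len) (hl : loin < len) :
    (if idx + loin ≥ len then idx + loin - len else idx + loin) = (idx + loin) % len := by
  split_ifs with h
  · have h2 : idx + loin - len < len := by omega
    have : (idx + loin) % len = (idx + loin - len) % len := by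
      conv_lhs => rw [show idx + loin = (idx + loin - len) + 1 * len by omega]
      simp
    rw [this, Nat.mod_eq_of_lt h2]
  · rw [Nat.mod_eq_of_lt (by omega)]

-- main loop invariant: at step i, cur is the first i chars shifted, and the loop
-- yields the remaining passwords (indices n down to i+1) in front of result
theorem pvA_loop_eq (al : List Char) (loin : Nat) (hl : loin < al.length ∨ al.length = 0)
    (m : List Char) (hm : ∀ c ∈ m, c ∈ al) :
    ∀ i (result : List String), i ≤ m.length →
    pvA_loop al loin m.length i ((m.take i).map (pvShiftT al loin) ++ m.drop i) result
      = some ((List.range' (i+1) (m.length - i)).reverse.map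
          (fun k => String.ofList ((m.map (pvShiftT al loin)).take k ++ m.drop k)) ++ result) := by
    intro i result hi
    induction hk : m.length - i generalizing i result with
    | zero =>
      have : ¬ i < m.length := by omega
      rw [pvA_loop]
      simp [this]
    | succ k ih =>
      have hilt : i < m.length := by omega
      have hc : m[i] ∈ al := hm _ (List.getElem_mem hilt)
      have hlen0 : 0 < al.length := List.length_pos_of_mem hc
      have hloin : loin < al.length := by rcases hl with h | h; exact h; omega
      obtain ⟨idx, hidx⟩ := Option.isSome_iff_exists.mp
        ((PySem.List.index?_isSome_iff al m[i]).mpr hc)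
      obtain ⟨hidxlt, -, -⟩ := PySem.List.getElem_of_index?_eq_some hidx
      have hidx' := hidx
      rw [PySem.List.index?_eq_idxOf?] at hidx'
      have htl : ((m.take i).map (pvShiftT al loin)).length = i := by
        simp [List.length_take, Nat.min_eq_left (le_of_lt hilt)]
      have hget : ((m.take i).map (pvShiftT al loin) ++ m.drop i)[i]? = some m[i] := by
        rw [List.getElem?_append_right (by omega), htl]
        simp [hilt]
      have hposlt : (idx + loin) % al.length < al.length := Nat.mod_lt _ hlen0
      have hAl : al[(idx + loin) % al.length]? = some (pvShiftT al loin m[i]) := by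
        rw [List.getElem?_eq_getElem hposlt]
        simp [pvShiftT, hidx', List.getElem?_eq_getElem hposlt]
      have hset : ((m.take i).map (pvShiftT al loin) ++ m.drop i).set i (pvShiftT al loin m[i])
          = (m.take (i+1)).map (pvShiftT al loin) ++ m.drop (i+1) := by
        have h1 : m.drop i = m[i] :: m.drop (i+1) := List.drop_eq_getElem_cons hilt
        have hiM : i < (m.map (pvShiftT al loin)).length := by simpa using hilt
        have h2 : (m.map (pvShiftT al loin)).take (i+1)
            = (m.map (pvShiftT al loin)).take i ++ [pvShiftT al loin m[i]] := by
          rw [List.take_add_one, List.getElem?_eq_getElem hiM]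
          simp
        rw [List.set_append_right _ _ (by omega), htl, Nat.sub_self, h1,
          List.map_take, List.map_take, h2]
        simp
        rw [h1, List.set_cons_zero]
      rw [pvA_loop]
      simp only [hilt, dif_pos, hget, hidx, pvPos_eq hidxlt hloin, hAl, hset]
      rw [ih (i+1) _ (by omega) (by omega)]
      congr 1
      rw [List.range'_succ]
      simp

theorem pvRange_reverse_succ (n : Nat) :
    (List.range (n+1)).reverse = (List.range' 1 n).reverse ++ [0] := by
  rw [List.range_eq_range', List.range'_succ, List.reverse_cons]

-- ===== VERDICT (by name: the statement is the Claim_ definition above) =====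
theorem plusloin_spec : Claim_equal_plusloin := by
  intro mdp alphabet _ hpre
  unfold Spec_plusloin plusloin plusloin_alt
  have hm : ∀ c ∈ mdp.toList, c ∈ alphabet.toList := by
    unfold Pre_plusloin at hpre
    simpa [List.all_eq_true] using hpre
  have hl : alphabet.toList.length / 2 < alphabet.toList.length ∨ alphabet.toList.length = 0 := by
    rcases Nat.eq_zero_or_pos alphabet.toList.length with h | h
    · right; exact h
    · left; exact Nat.div_lt_self h (by norm_num)
  have h0 := pvA_loop_eq alphabet.toList (alphabet.toList.length / 2) hl mdp.toList hm 0 [mdp]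
    (Nat.zero_le _)
  simp only [List.take_zero, List.map_nil, List.nil_append, List.drop_zero, Nat.sub_zero] at h0
  rw [h0, pvMapM_shift hm]
  simp only [Option.getD_some]
  rw [pvRange_reverse_succ, List.map_append]
  congr 1
  simp [String.ofList_toList]
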